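-- pv_equiv track=rewrite | github.com/KannigaDeviS/advent_of_code_2025 | Day7/main.py | count_timelines_quantum
-- ===== SOURCE A (Python) =====
-- from typing import List, Tuple
--
-- def find_start(grid: List[str]) -> Tuple[int, int]:
--     for r, row in enumerate(grid):
--         c = row.find('S')
--         if c != -1:
--             return r, c
--     raise ValueError("No starting position 'S' found.")
--
-- def count_timelines_quantum(grid: List[str]) -> int:
--     """
--     Part 2: Quantum manifold.
--     Returns the number of distinct timelines after processing all rows.
--     """
--     n_rows = len(grid)
--     n_cols = len(grid[0])
--     start_row, start_col = find_start(grid)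
--
--     # counts[c] = number of timelines currently at column c on the current row
--     counts = [0] * n_cols
--     counts[start_col] = 1
--
--     for r in range(start_row + 1, n_rows):
--         row = grid[r]
--         next_counts = [0] * n_cols
--
--         for c, k in enumerate(counts):
--             if k == 0:
--                 continue
--             cell = row[c]
--             if cell == '.':
--                 next_counts[c] += k
--             elif cell == '^':
--                 if c - 1 >= 0:
--                     next_counts[c - 1] += k
--                 if c + 1 < n_cols:
--                     next_counts[c + 1] += k
--             else:
--                 # Treat unknown as empty space
--                 next_counts[c] += k
--
--         counts = next_counts
--         if sum(counts) == 0: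
--             break
--
--     return sum(counts)
-- ===== SOURCE B (Python) =====
-- def find_start(grid):
--     for r, row in enumerate(grid):
--         c = row.find('S')
--         if c != -1:
--             return r, c
--     raise ValueError("No starting position 'S' found.")
--
-- def count_timelines_quantum(grid):
--     """
--     Backward continuation-count DP: ways[c] = number of timelines that a single
--     walker at column c of the current row eventually produces at the bottom.
--     Rows are processed bottom-up; the answer is read off at the start cell.
--     """
--     n_rows = len(grid)
--     n_cols = len(grid[0])
--     start_row, start_col = find_start(grid)
--
--     ways = [1] * n_cols
--     for r in range(n_rows - 1, start_row, -1):
--         row = grid[r]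
--         ways = [
--             ((ways[c - 1] if c - 1 >= 0 else 0)
--              + (ways[c + 1] if c + 1 < n_cols else 0))
--             if row[c] == '^' else ways[c]
--             for c in range(n_cols)
--         ]
--     return ways[start_col]
-- ===== Notes on version B (the rewrite author's own statement) =====
-- stated objective: alternative
-- what changed: A's forward occupancy DP (seed 1 at S, scatter each live column into the next row, early break when the sum hits 0, return the final sum) is replaced by a backward continuation-count DP: iterate the rows bottom-up computing ways[c] = number of timelines a single walker at column c eventually produces (initialised to all ones at the last row), and return ways[start_col]; there is no seeded counts vector, no scatter, no sum and no break.
-- outside the precondition, e.g. on count_timelines_quantum(['S..', '^']): A returns 1, B raises IndexError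
import Mathlib
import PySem

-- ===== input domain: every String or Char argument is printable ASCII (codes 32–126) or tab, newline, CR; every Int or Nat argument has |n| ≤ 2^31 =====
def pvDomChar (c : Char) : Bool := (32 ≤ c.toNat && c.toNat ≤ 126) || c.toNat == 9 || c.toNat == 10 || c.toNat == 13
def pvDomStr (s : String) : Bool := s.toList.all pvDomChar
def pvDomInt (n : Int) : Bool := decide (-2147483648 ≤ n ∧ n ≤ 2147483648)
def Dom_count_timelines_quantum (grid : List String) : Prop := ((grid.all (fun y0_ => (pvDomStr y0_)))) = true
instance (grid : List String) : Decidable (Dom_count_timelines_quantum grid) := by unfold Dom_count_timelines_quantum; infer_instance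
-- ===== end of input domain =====

-- B replaces A's forward occupancy DP (scatter + early break + final sum) by a backward
-- continuation-count DP processed bottom-up, reading the answer at the start cell (objective: alternative).

-- ===== PORT A =====
-- find_start: first row containing 'S', with the column of that 'S'
def pvFindStartA (grid : List String) (r : Nat) : Option (Nat × Nat) :=
  match grid with
  | [] => none
  | row :: rest =>
    let c := PySem.Str.find row "S"
    if c ≠ -1 then some (r, c.toNat) else pvFindStartA rest (r + 1)

-- inner loop `for c, k in enumerate(counts)`; row access out of range is excluded by Pre_
-- (the ' ' default is never the value Python computes there: Python raises IndexError).
def pvCellStep (row : List Char) (nCols : Nat) (c : Nat) (k : Int) (next : List Int) : List Int :=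
  let cell := row.getD c ' '
  if cell = '.' then next.modify c (· + k)
  else if cell = '^' then
    let n1 := if 1 ≤ c then next.modify (c - 1) (· + k) else next
    if c + 1 < nCols then n1.modify (c + 1) (· + k) else n1
  else next.modify c (· + k)

def pvScatterA (row : List Char) (nCols : Nat) (c : Nat) (rem : List Int) (next : List Int) : List Int :=
  match rem with
  | [] => next
  | k :: rest =>
    if k = 0 then pvScatterA row nCols (c + 1) rest next
    else pvScatterA row nCols (c + 1) rest (pvCellStep row nCols c k next)

-- outer loop `for r in range(start_row+1, n_rows)` with the `sum(counts)==0` break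
def pvLoopA (rows : List String) (nCols : Nat) (counts : List Int) : List Int :=
  match rows with
  | [] => counts
  | row :: rest =>
    let next := pvScatterA row.toList nCols 0 counts (List.replicate nCols 0)
    if next.sum = 0 then next else pvLoopA rest nCols next

def count_timelines_quantum (grid : List String) : Int :=
  match pvFindStartA grid 0 with
  | none => 0  -- Python raises ValueError here; excluded by Pre_
  | some (sr, sc) =>
    let nCols := (grid.headI).toList.length
    let counts := (List.replicate nCols (0 : Int)).set sc 1
    (pvLoopA (grid.drop (sr + 1)) nCols counts).sum

-- ===== PORT B =====
def pvFindStartB (grid : List String) (r : Nat) : Option (Nat × Nat) :=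
  match grid with
  | [] => none
  | row :: rest =>
    let c := PySem.Str.find row "S"
    if c ≠ -1 then some (r, c.toNat) else pvFindStartB rest (r + 1)

-- the comprehension computing the previous row's continuation counts from the current ones
def pvBackStep (row : List Char) (nCols : Nat) (w : List Int) : List Int :=
  (List.range nCols).map (fun c =>
    if row.getD c ' ' = '^' then
      (if 1 ≤ c then w.getD (c - 1) 0 else 0) + (if c + 1 < nCols then w.getD (c + 1) 0 else 0)
    else w.getD c 0)

-- `for r in range(n_rows-1, start_row, -1)` over grid[start_row+1:], bottom row first:
-- structural recursion applies the head's step last, matching the descending Python loop.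
def pvLoopB (rows : List String) (nCols : Nat) (w : List Int) : List Int :=
  match rows with
  | [] => w
  | row :: rest => pvBackStep row.toList nCols (pvLoopB rest nCols w)

def count_timelines_quantum_alt (grid : List String) : Int :=
  match pvFindStartB grid 0 with
  | none => 0  -- Python raises ValueError here; excluded by Pre_
  | some (sr, sc) =>
    let nCols := (grid.headI).toList.length
    -- `ways[start_col]`: sc < nCols on Pre_ (so getD's default is never the value used)
    (pvLoopB (grid.drop (sr + 1)) nCols (List.replicate nCols 1)).getD sc 0

-- ===== PRECONDITION & SPEC =====
-- Pre_ excludes inputs where Python A raises (empty grid, no 'S', 'S' at a column ≥ len(grid[0]),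
-- a too-short row reached by a live column) and, with the "every row after the start row has at
-- least len(grid[0]) characters" clause, also some ragged grids on which A happens to return
-- because the short row's missing columns never hold a timeline; B's comprehension reads every
-- column of each row and raises IndexError there.
def Pre_count_timelines_quantum (grid : List String) : Prop :=
  grid ≠ [] ∧
  ((grid.findIdx? (fun row => row.toList.contains 'S')).any (fun sr =>
      decide ((grid.getD sr "").toList.findIdx (· = 'S') < (grid.headI).toList.length) &&
      (grid.drop (sr + 1)).all (fun row => decide ((grid.headI).toList.length ≤ row.toList.length))))
    = true

instance (grid : List String) : Decidable (Pre_count_timelines_quantum grid) := by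
  unfold Pre_count_timelines_quantum; infer_instance

def pvWitness_count_timelines_quantum : List String := (["S.", ".^"])

def Spec_count_timelines_quantum (grid : List String) (out : Int) : Prop := out = count_timelines_quantum_alt grid
instance (grid : List String) (out : Int) : Decidable (Spec_count_timelines_quantum grid out) := by unfold Spec_count_timelines_quantum; infer_instance

-- ===== CLAIM (what is proved, stated in full; the proofs are below) =====
def Claim_equal_count_timelines_quantum : Prop := ∀ (grid : List String), Dom_count_timelines_quantum grid → Pre_count_timelines_quantum grid → Spec_count_timelines_quantum grid (count_timelines_quantum grid)

-- ===== LEMMAS AND PROOFS =====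

-- pull form of A's scatter pass (proof-side only)
def pvPull (row : List Char) (nCols : Nat) (counts : List Int) : List Int :=
  (List.range nCols).map (fun c =>
    (if row.getD c ' ' ≠ '^' then counts.getD c 0 else 0)
    + (if 1 ≤ c ∧ row.getD (c - 1) ' ' = '^' then counts.getD (c - 1) 0 else 0)
    + (if c + 1 < nCols ∧ row.getD (c + 1) ' ' = '^' then counts.getD (c + 1) 0 else 0))

-- the contribution column c (holding k timelines) sends to column j in A's scatter pass
def pvContrib (row : List Char) (nCols : Nat) (j c : Nat) (k : Int) : Int :=
  if k = 0 then 0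
  else
    let cell := row.getD c ' '
    if cell = '.' then (if c = j then k else 0)
    else if cell = '^' then
      (if 1 ≤ c ∧ c - 1 = j then k else 0) + (if c + 1 < nCols ∧ c + 1 = j then k else 0)
    else (if c = j then k else 0)

-- generic "sum of g over the enumerated tail starting at index m"
def pvTS (g : Nat → Int → Int) (m : Nat) (xs : List Int) : Int :=
  match xs with
  | [] => 0
  | k :: rest => g m k + pvTS g (m + 1) rest

-- dot product of the first n entries (out-of-range entries read as 0)
def pvDot (n : Nat) (xs ys : List Int) : Int :=
  ∑ j ∈ Finset.range n, xs.getD j 0 * ys.getD j 0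

lemma pv_getD_modify_add (xs : List Int) (i j : Nat) (k : Int) :
    (xs.modify i (· + k)).getD j 0
      = xs.getD j 0 + (if i = j ∧ j < xs.length then k else 0) := by
  simp only [List.getD, List.getElem?_modify]
  rcases h : xs[j]? with _ | v
  · have : ¬ j < xs.length := by simpa using (List.getElem?_eq_none_iff.mp h)
    simp [this]
  · have hj : j < xs.length := by
      by_contra hc
      simp [List.getElem?_eq_none_iff.mpr (Nat.le_of_not_lt hc)] at h
    by_cases hij : i = j <;> simp [hij, hj]

lemma pv_cellstep_length (row : List Char) (nCols : Nat) (c : Nat) (k : Int)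
    (next : List Int) : (pvCellStep row nCols c k next).length = next.length := by
  unfold pvCellStep
  dsimp only
  split_ifs <;> simp

lemma pv_cellstep_getD (row : List Char) (nCols : Nat) (c : Nat) (k : Int)
    (next : List Int) (hk : k ≠ 0) (hlen : next.length = nCols) (j : Nat) (hj : j < nCols) :
    (pvCellStep row nCols c k next).getD j 0 = next.getD j 0 + pvContrib row nCols j c k := by
  unfold pvCellStep pvContrib
  dsimp only
  simp only [if_neg hk]
  by_cases hdot : row.getD c ' ' = '.'
  · simp only [if_pos hdot]
    rw [pv_getD_modify_add, hlen]
    split_ifs <;> omega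
  · by_cases hup : row.getD c ' ' = '^'
    · simp only [if_neg hdot, if_pos hup]
      by_cases h2 : c + 1 < nCols <;> by_cases h1 : 1 ≤ c
      · rw [if_pos h2, if_pos h1, pv_getD_modify_add, List.length_modify,
          pv_getD_modify_add, hlen]
        split_ifs <;> omega
      · rw [if_pos h2, if_neg h1, pv_getD_modify_add, hlen]
        split_ifs <;> omega
      · rw [if_neg h2, if_pos h1, pv_getD_modify_add, hlen]
        split_ifs <;> omega
      · rw [if_neg h2, if_neg h1]
        split_ifs <;> omega
    · simp only [if_neg hdot, if_neg hup]
      rw [pv_getD_modify_add, hlen]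
      split_ifs <;> omega

lemma pv_scatter_length (row : List Char) (nCols : Nat) :
    ∀ (rem : List Int) (c : Nat) (next : List Int),
      (pvScatterA row nCols c rem next).length = next.length := by
  intro rem
  induction rem with
  | nil => intro c next; simp [pvScatterA]
  | cons k rest ih =>
    intro c next
    simp only [pvScatterA]
    split_ifs
    · rw [ih]
    · rw [ih, pv_cellstep_length]

lemma pv_scatter_getD (row : List Char) (nCols : Nat) :
    ∀ (rem : List Int) (c : Nat) (next : List Int), next.length = nCols →
      ∀ j, j < nCols →
        (pvScatterA row nCols c rem next).getD j 0
          = next.getD j 0 + pvTS (pvContrib row nCols j) c rem := by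
  intro rem
  induction rem with
  | nil => intro c next _ j _; simp [pvScatterA, pvTS]
  | cons k rest ih =>
    intro c next hlen j hj
    simp only [pvScatterA, pvTS]
    by_cases hk : k = 0
    · rw [if_pos hk, ih (c + 1) next hlen j hj]
      simp [pvContrib, hk]
    · rw [if_neg hk,
        ih (c + 1) (pvCellStep row nCols c k next) (by rw [pv_cellstep_length, hlen]) j hj,
        pv_cellstep_getD row nCols c k next hk hlen j hj]
      ring

-- one-hot sums: pvTS of a function supported on a single index t
lemma pv_ts_onehot (h : Int → Int) (t : Nat) :
    ∀ (xs : List Int) (m : Nat),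
      pvTS (fun c k => if c = t then h k else 0) m xs
        = if m ≤ t ∧ t < m + xs.length then h (xs.getD (t - m) 0) else 0 := by
  intro xs
  induction xs with
  | nil => intro m; simp only [pvTS, List.length_nil]; rw [if_neg (by omega)]
  | cons k rest ih =>
    intro m
    simp only [pvTS, ih]
    by_cases hm : m = t
    · subst hm
      rw [if_pos rfl, if_neg (by omega), if_pos (by simp only [List.length_cons]; omega)]
      simp [List.getD]
    · rw [if_neg hm]
      by_cases hlt : m + 1 ≤ t ∧ t < m + 1 + rest.length
      · rw [if_pos hlt, if_pos (by simp only [List.length_cons]; omega)]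
        have ht : t - m = (t - (m + 1)) + 1 := by omega
        simp [ht, List.getD]
      · rw [if_neg hlt, if_neg (by simp only [List.length_cons]; omega)]
        simp

lemma pv_ts_add (g₁ g₂ : Nat → Int → Int) :
    ∀ (xs : List Int) (m : Nat),
      pvTS (fun c k => g₁ c k + g₂ c k) m xs = pvTS g₁ m xs + pvTS g₂ m xs := by
  intro xs
  induction xs with
  | nil => intro m; simp [pvTS]
  | cons k rest ih => intro m; simp only [pvTS, ih]; ring

-- the contribution function splits into three one-hot functions (targets j, j+1, j-1)
set_option maxHeartbeats 1000000 in
lemma pv_contrib_split (row : List Char) (nCols : Nat) (j : Nat) (c : Nat) (k : Int) :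
    pvContrib row nCols j c k
      = ((if c = j then (if row.getD j ' ' ≠ '^' then k else 0) else 0)
          + (if c = j + 1 then (if row.getD (j + 1) ' ' = '^' then k else 0) else 0))
        + (if c = j - 1 then
             (if 1 ≤ j ∧ j < nCols ∧ row.getD (j - 1) ' ' = '^' then k else 0) else 0) := by
  unfold pvContrib
  dsimp only
  by_cases hk : k = 0
  · subst hk; split_ifs <;> simp
  · simp only [if_neg hk]
    by_cases hcj : c = j <;> by_cases hcj1 : c = j + 1 <;> by_cases hcjm : c = j - 1 <;>
      split_ifs <;> first | omega | (simp_all; omega) | simp_all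

-- A's scatter pass equals the pull pass, pointwise and hence as lists
lemma pv_step_eq (row : List Char) (nCols : Nat) (counts : List Int)
    (hlen : counts.length = nCols) :
    pvScatterA row nCols 0 counts (List.replicate nCols 0) = pvPull row nCols counts := by
  have hLa : (pvScatterA row nCols 0 counts (List.replicate nCols 0)).length = nCols := by
    simp [pv_scatter_length]
  have hLb : (pvPull row nCols counts).length = nCols := by simp [pvPull]
  apply List.ext_getElem (by rw [hLa, hLb])
  intro j hj₁ hj₂
  have hj : j < nCols := by rwa [hLa] at hj₁
  have ha := pv_scatter_getD row nCols counts 0 (List.replicate nCols 0) (by simp) j hj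
  have hsplit : pvTS (pvContrib row nCols j) 0 counts
      = (pvTS (fun c k => if c = j then (if row.getD j ' ' ≠ '^' then k else 0) else 0) 0 counts
        + pvTS (fun c k => if c = j + 1 then (if row.getD (j + 1) ' ' = '^' then k else 0) else 0) 0 counts)
        + pvTS (fun c k => if c = j - 1 then
            (if 1 ≤ j ∧ j < nCols ∧ row.getD (j - 1) ' ' = '^' then k else 0) else 0) 0 counts := by
    rw [← pv_ts_add, ← pv_ts_add]
    have hfun : (pvContrib row nCols j) = (fun c k =>
        ((if c = j then (if row.getD j ' ' ≠ '^' then k else 0) else 0)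
          + (if c = j + 1 then (if row.getD (j + 1) ' ' = '^' then k else 0) else 0))
          + (if c = j - 1 then
              (if 1 ≤ j ∧ j < nCols ∧ row.getD (j - 1) ' ' = '^' then k else 0) else 0)) := by
      funext c k
      exact pv_contrib_split row nCols j c k
    rw [hfun]
  have hga : (pvScatterA row nCols 0 counts (List.replicate nCols 0))[j]'hj₁
      = (pvScatterA row nCols 0 counts (List.replicate nCols 0)).getD j 0 :=
    (List.getD_eq_getElem _ _ hj₁).symm
  have hgb : (pvPull row nCols counts)[j]'hj₂
      = (if row.getD j ' ' ≠ '^' then counts.getD j 0 else 0)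
        + (if 1 ≤ j ∧ row.getD (j - 1) ' ' = '^' then counts.getD (j - 1) 0 else 0)
        + (if j + 1 < nCols ∧ row.getD (j + 1) ' ' = '^' then counts.getD (j + 1) 0 else 0) := by
    simp [pvPull]
  have hrep : (List.replicate nCols (0 : Int)).getD j 0 = 0 := by
    simp [List.getD, hj]
  have hjm : j - 1 < nCols := by omega
  rw [hga, ha, hgb, hsplit, pv_ts_onehot, pv_ts_onehot, pv_ts_onehot, hrep, hlen]
  simp only [Nat.zero_le, true_and, Nat.sub_zero, hj, hjm, if_true, zero_add, ite_and]
  split_ifs <;> omega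

lemma pv_findstart_eq : ∀ (grid : List String) (r : Nat),
    pvFindStartA grid r = pvFindStartB grid r := by
  intro grid
  induction grid with
  | nil => intro r; rfl
  | cons row rest ih => intro r; simp only [pvFindStartA, pvFindStartB]; split_ifs <;> simp [ih]

lemma pv_getD_nonneg (xs : List Int) (h : ∀ x ∈ xs, 0 ≤ x) (j : Nat) : 0 ≤ xs.getD j 0 := by
  simp only [List.getD]
  rcases hx : xs[j]? with _ | v
  · simp
  · exact (by simpa using h v (List.mem_of_getElem? hx))

lemma pv_pull_nonneg (row : List Char) (nCols : Nat) (counts : List Int)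
    (h : ∀ x ∈ counts, 0 ≤ x) : ∀ x ∈ pvPull row nCols counts, 0 ≤ x := by
  intro x hx
  simp only [pvPull, List.mem_map, List.mem_range] at hx
  obtain ⟨c, -, rfl⟩ := hx
  have h1 := pv_getD_nonneg counts h c
  have h2 := pv_getD_nonneg counts h (c - 1)
  have h3 := pv_getD_nonneg counts h (c + 1)
  split_ifs <;> omega

lemma pv_sum_zero_getD (xs : List Int) (hnn : ∀ x ∈ xs, 0 ≤ x) (hs : xs.sum = 0) (j : Nat) :
    xs.getD j 0 = 0 := by
  have hall : ∀ x ∈ xs, x = 0 := by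
    induction xs with
    | nil => simp
    | cons k rest ih =>
      have hk : 0 ≤ k := hnn k (by simp)
      have hrest : 0 ≤ rest.sum := List.sum_nonneg (fun x hx => hnn x (by simp [hx]))
      have hsum : k + rest.sum = 0 := by simpa using hs
      have hk0 : k = 0 := by omega
      have hr0 : rest.sum = 0 := by omega
      intro x hx
      rcases List.mem_cons.mp hx with rfl | hx'
      · exact hk0
      · exact ih (fun y hy => hnn y (by simp [hy])) hr0 x hx'
  simp only [List.getD]
  rcases hx : xs[j]? with _ | v
  · simp
  · simpa using hall v (List.mem_of_getElem? hx)

lemma pv_sum_eq_range (xs : List Int) :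
    xs.sum = ∑ j ∈ Finset.range xs.length, xs.getD j 0 := by
  induction xs with
  | nil => simp
  | cons k rest ih =>
    rw [List.sum_cons, List.length_cons, Finset.sum_range_succ' (fun j => (k :: rest).getD j 0)]
    simp only [List.getD_cons_succ, List.getD_cons_zero]
    rw [← ih]; ring

lemma pv_dot_ones (n : Nat) (xs : List Int) (hlen : xs.length = n) :
    pvDot n xs (List.replicate n 1) = xs.sum := by
  unfold pvDot
  rw [pv_sum_eq_range, hlen]
  refine Finset.sum_congr rfl (fun j hj => ?_)
  have : (List.replicate n (1 : Int)).getD j 1 = 1 := by simp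
  have hjn : j < n := Finset.mem_range.mp hj
  simp [List.getD, hjn]

lemma pv_dot_zero (n : Nat) (xs ys : List Int) (h : ∀ j, xs.getD j 0 = 0) :
    pvDot n xs ys = 0 := by
  unfold pvDot
  refine Finset.sum_eq_zero (fun j _ => ?_)
  rw [h j]; ring

lemma pv_backstep_length (row : List Char) (nCols : Nat) (w : List Int) :
    (pvBackStep row nCols w).length = nCols := by simp [pvBackStep]

lemma pv_loopB_length (nCols : Nat) (rows : List String) (w : List Int) (h : w.length = nCols) :
    (pvLoopB rows nCols w).length = nCols := by
  induction rows with
  | nil => simpa [pvLoopB]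
  | cons row rest ih => simp [pvLoopB, pv_backstep_length]

lemma pv_onehot_sum (n t : Nat) (f : Nat → Int) :
    (∑ j ∈ Finset.range n, if j = t then f j else 0) = if t < n then f t else 0 := by
  rw [Finset.sum_ite_eq' (Finset.range n) t f]
  simp

-- adjointness: pulling counts forward then dotting with w = dotting counts with w pulled backward
lemma pv_adjoint (row : List Char) (n : Nat) (counts w : List Int) :
    pvDot n (pvPull row n counts) w = pvDot n counts (pvBackStep row n w) := by
  unfold pvDot
  have hL : ∀ j, j < n → (pvPull row n counts).getD j 0
      = (if row.getD j ' ' ≠ '^' then counts.getD j 0 else 0)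
        + (if 1 ≤ j ∧ row.getD (j - 1) ' ' = '^' then counts.getD (j - 1) 0 else 0)
        + (if j + 1 < n ∧ row.getD (j + 1) ' ' = '^' then counts.getD (j + 1) 0 else 0) := by
    intro j hj
    have : (pvPull row n counts)[j]? = some _ := List.getElem?_eq_getElem (by simp [pvPull, hj])
    simp [pvPull, List.getD, hj]
  have hR : ∀ c, c < n → (pvBackStep row n w).getD c 0
      = if row.getD c ' ' = '^' then
          (if 1 ≤ c then w.getD (c - 1) 0 else 0) + (if c + 1 < n then w.getD (c + 1) 0 else 0)
        else w.getD c 0 := by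
    intro c hc
    simp [pvBackStep, List.getD, hc]
  calc
    (∑ j ∈ Finset.range n, (pvPull row n counts).getD j 0 * w.getD j 0)
        = ∑ j ∈ Finset.range n,
            ((if row.getD j ' ' ≠ '^' then counts.getD j 0 * w.getD j 0 else 0)
             + (if 1 ≤ j ∧ row.getD (j - 1) ' ' = '^' then counts.getD (j - 1) 0 * w.getD j 0 else 0)
             + (if j + 1 < n ∧ row.getD (j + 1) ' ' = '^' then counts.getD (j + 1) 0 * w.getD j 0 else 0)) := by
      refine Finset.sum_congr rfl (fun j hj => ?_)
      rw [hL j (Finset.mem_range.mp hj)]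
      split_ifs <;> ring
    _ = (∑ j ∈ Finset.range n, (if row.getD j ' ' ≠ '^' then counts.getD j 0 * w.getD j 0 else 0))
        + (∑ j ∈ Finset.range n, (if 1 ≤ j ∧ row.getD (j - 1) ' ' = '^' then counts.getD (j - 1) 0 * w.getD j 0 else 0))
        + (∑ j ∈ Finset.range n, (if j + 1 < n ∧ row.getD (j + 1) ' ' = '^' then counts.getD (j + 1) 0 * w.getD j 0 else 0)) := by
      rw [← Finset.sum_add_distrib, ← Finset.sum_add_distrib]
    _ = ∑ c ∈ Finset.range n, counts.getD c 0 * (pvBackStep row n w).getD c 0 := by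
      cases n with
      | zero => simp
      | succ m =>
        have e2 : (∑ j ∈ Finset.range (m + 1),
              (if 1 ≤ j ∧ row.getD (j - 1) ' ' = '^' then counts.getD (j - 1) 0 * w.getD j 0 else 0))
            = ∑ c ∈ Finset.range m,
              (if row.getD c ' ' = '^' then counts.getD c 0 * w.getD (c + 1) 0 else 0) := by
          rw [Finset.sum_range_succ' (fun j => if 1 ≤ j ∧ row.getD (j - 1) ' ' = '^' then counts.getD (j - 1) 0 * w.getD j 0 else 0)]
          simp only [Nat.le_add_left, true_and, Nat.add_sub_cancel]
          rw [if_neg (by omega)]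
          ring
        have e3 : (∑ j ∈ Finset.range (m + 1),
              (if j + 1 < m + 1 ∧ row.getD (j + 1) ' ' = '^' then counts.getD (j + 1) 0 * w.getD j 0 else 0))
            = ∑ j ∈ Finset.range m,
              (if row.getD (j + 1) ' ' = '^' then counts.getD (j + 1) 0 * w.getD j 0 else 0) := by
          rw [Finset.sum_range_succ]
          rw [if_neg (by omega)]
          rw [add_zero]
          refine Finset.sum_congr rfl (fun j hj => ?_)
          have : j + 1 < m + 1 := by have := Finset.mem_range.mp hj; omega
          simp [this]
        rw [e2, e3]
        have eR : (∑ c ∈ Finset.range (m + 1), counts.getD c 0 * (pvBackStep row (m + 1) w).getD c 0)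
            = ∑ c ∈ Finset.range (m + 1), counts.getD c 0 *
                (if row.getD c ' ' = '^' then
                  (if 1 ≤ c then w.getD (c - 1) 0 else 0) + (if c + 1 < m + 1 then w.getD (c + 1) 0 else 0)
                else w.getD c 0) := by
          refine Finset.sum_congr rfl (fun c hc => ?_)
          rw [hR c (Finset.mem_range.mp hc)]
        rw [eR]
        have split : ∀ c, counts.getD c 0 *
                (if row.getD c ' ' = '^' then
                  (if 1 ≤ c then w.getD (c - 1) 0 else 0) + (if c + 1 < m + 1 then w.getD (c + 1) 0 else 0)
                else w.getD c 0)
            = (if row.getD c ' ' ≠ '^' then counts.getD c 0 * w.getD c 0 else 0)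
              + (if row.getD c ' ' = '^' ∧ 1 ≤ c then counts.getD c 0 * w.getD (c - 1) 0 else 0)
              + (if row.getD c ' ' = '^' ∧ c + 1 < m + 1 then counts.getD c 0 * w.getD (c + 1) 0 else 0) := by
          intro c
          by_cases h : row.getD c ' ' = '^' <;>
            simp only [h, ne_eq, not_true_eq_false, not_false_eq_true, if_true, if_false,
              true_and, false_and, mul_ite, mul_zero, mul_add] <;>
            ring
        simp only [split]
        rw [Finset.sum_add_distrib, Finset.sum_add_distrib]
        -- pair the shifted sums: e2's term with the '^'∧c+1<m+1 sum, e3's with the '^'∧1≤c sum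
        have hB : (∑ c ∈ Finset.range m, if row.getD c ' ' = '^' then counts.getD c 0 * w.getD (c + 1) 0 else 0)
            = ∑ c ∈ Finset.range (m + 1), if row.getD c ' ' = '^' ∧ c + 1 < m + 1 then counts.getD c 0 * w.getD (c + 1) 0 else 0 := by
          rw [Finset.sum_range_succ, if_neg (by omega), add_zero]
          refine Finset.sum_congr rfl (fun c hc => ?_)
          have hc' : c + 1 < m + 1 := by have := Finset.mem_range.mp hc; omega
          simp [hc']
        have hC : (∑ j ∈ Finset.range m, if row.getD (j + 1) ' ' = '^' then counts.getD (j + 1) 0 * w.getD j 0 else 0)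
            = ∑ c ∈ Finset.range (m + 1), if row.getD c ' ' = '^' ∧ 1 ≤ c then counts.getD c 0 * w.getD (c - 1) 0 else 0 := by
          rw [Finset.sum_range_succ' (fun c => if row.getD c ' ' = '^' ∧ 1 ≤ c then counts.getD c 0 * w.getD (c - 1) 0 else 0)]
          simp only [Nat.le_add_left, Nat.add_sub_cancel]
          rw [if_neg (by omega), add_zero]
          refine Finset.sum_congr rfl (fun c hc => ?_)
          simp
        rw [hB, hC]
        ring

-- the main invariant: A's remaining forward loop, summed, equals dotting the current
-- occupancy with B's continuation counts for the remaining rows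
lemma pv_main (n : Nat) : ∀ (rows : List String) (counts : List Int),
    counts.length = n → (∀ x ∈ counts, 0 ≤ x) →
    (pvLoopA rows n counts).sum = pvDot n counts (pvLoopB rows n (List.replicate n 1)) := by
  intro rows
  induction rows with
  | nil =>
    intro counts hlen _
    simp only [pvLoopA, pvLoopB]
    exact (pv_dot_ones n counts hlen).symm
  | cons row rest ih =>
    intro counts hlen hnn
    simp only [pvLoopA, pvLoopB]
    rw [pv_step_eq row.toList n counts hlen]
    rw [← pv_adjoint row.toList n counts (pvLoopB rest n (List.replicate n 1))]
    have hplen : (pvPull row.toList n counts).length = n := by simp [pvPull]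
    have hpnn := pv_pull_nonneg row.toList n counts hnn
    by_cases hz : (pvPull row.toList n counts).sum = 0
    · rw [if_pos hz, hz]
      exact (pv_dot_zero n _ _ (pv_sum_zero_getD _ hpnn hz)).symm
    · rw [if_neg hz]
      exact ih _ hplen hpnn

lemma pv_dot_onehot (n sc : Nat) (w : List Int) (hw : w.length = n) :
    pvDot n ((List.replicate n (0 : Int)).set sc 1) w = w.getD sc 0 := by
  by_cases hsc : sc < n
  · unfold pvDot
    have hinit : ∀ j, j < n → ((List.replicate n (0 : Int)).set sc 1).getD j 0
        = if j = sc then 1 else 0 := by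
      intro j hj
      simp only [List.getD, List.getElem?_set]
      by_cases hjs : sc = j
      · subst hjs; simp [hj]
      · have : j ≠ sc := fun h => hjs h.symm
        simp [hjs, this, hj]
    calc (∑ j ∈ Finset.range n, ((List.replicate n (0 : Int)).set sc 1).getD j 0 * w.getD j 0)
        = ∑ j ∈ Finset.range n, (if j = sc then w.getD j 0 else 0) := by
          refine Finset.sum_congr rfl (fun j hj => ?_)
          rw [hinit j (Finset.mem_range.mp hj)]
          split_ifs <;> ring
      _ = w.getD sc 0 := by rw [pv_onehot_sum n sc (fun j => w.getD j 0)]; simp [hsc]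
  · have hset : (List.replicate n (0 : Int)).set sc 1 = List.replicate n 0 := by
      apply List.set_eq_of_length_le
      simp; omega
    rw [hset, pv_dot_zero n _ _ (fun j => by
      by_cases hj : j < n <;> simp [List.getD, hj])]
    have : w.getD sc 0 = 0 := by
      apply List.getD_eq_default
      omega
    rw [this]

lemma pv_init_nonneg (n sc : Nat) : ∀ x ∈ (List.replicate n (0 : Int)).set sc 1, 0 ≤ x := by
  intro x hx
  rcases List.mem_or_eq_of_mem_set hx with h | rfl
  · have := List.eq_of_mem_replicate h; omega
  · omega

-- ===== VERDICT (by name: the statement is the Claim_ definition above) =====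
theorem count_timelines_quantum_spec : Claim_equal_count_timelines_quantum := by
  intro grid _ _
  unfold Spec_count_timelines_quantum count_timelines_quantum count_timelines_quantum_alt
  rw [pv_findstart_eq]
  cases hfs : pvFindStartB grid 0 with
  | none => rfl
  | some p =>
    cases p with
    | mk sr sc =>
      simp only []
      rw [pv_main _ _ _ (by simp) (pv_init_nonneg _ _),
        pv_dot_onehot _ _ _ (pv_loopB_length _ _ _ (by simp))]
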